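-- pv_equiv track=rewrite | github.com/williams-jacquelinec/project1 | seqparser/seq.py | reverse_transcribe
-- ===== SOURCE A (Python) =====
-- def transcribe(seq: str) -> str:
--     """
--     transcribes DNA to RNA by generating
--     the complement sequence with T -> U replacement
--     """
--     seq_list = list(seq)
--     for i in range(len(seq_list)):
--         if seq_list[i] == 'A':
--             seq_list[i] = 'U'
--         elif seq_list[i] == 'T':
--             seq_list[i] = 'A'
--         elif seq_list[i] == 'C':
--             seq_list[i] = 'G'
--         else:
--             seq_list[i] = 'C'
--
--     transcribe_str = ''.join(seq_list)
--     return transcribe_str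
--
-- def reverse_transcribe(seq: str) -> str:
--     """
--     transcribes DNA to RNA then reverses
--     the strand
--     """
--     rev_transcribe_str = transcribe(seq)
--     rev_list = list(rev_transcribe_str)
--     for i in range(len(rev_list)):
--         if rev_list[i] == 'A':
--             rev_list[i] = 'U'
--         elif rev_list[i] == 'U':
--             rev_list[i] = 'A'
--         elif rev_list[i] == 'C':
--             rev_list[i] = 'G'
--         else:
--             rev_list[i] = 'C'
--
--     final_str = ''.join(rev_list)
--     return final_str
-- ===== SOURCE B (Python) =====
-- def reverse_transcribe(seq: str) -> str:
--     # composed map: A->A, T->U, C->C, everything else->G (single pass)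
--     out = []
--     for ch in seq:
--         if ch == 'A':
--             out.append('A')
--         elif ch == 'T':
--             out.append('U')
--         elif ch == 'C':
--             out.append('C')
--         else:
--             out.append('G')
--     return ''.join(out)
-- ===== Notes on version B (the rewrite author's own statement) =====
-- stated objective: simpler
-- what changed: Replaces the two sequential per-character rewrite passes (transcribe then a second substitution loop) with one pass applying the composed character map A->A, T->U, C->C, else->G.
import Mathlib
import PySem

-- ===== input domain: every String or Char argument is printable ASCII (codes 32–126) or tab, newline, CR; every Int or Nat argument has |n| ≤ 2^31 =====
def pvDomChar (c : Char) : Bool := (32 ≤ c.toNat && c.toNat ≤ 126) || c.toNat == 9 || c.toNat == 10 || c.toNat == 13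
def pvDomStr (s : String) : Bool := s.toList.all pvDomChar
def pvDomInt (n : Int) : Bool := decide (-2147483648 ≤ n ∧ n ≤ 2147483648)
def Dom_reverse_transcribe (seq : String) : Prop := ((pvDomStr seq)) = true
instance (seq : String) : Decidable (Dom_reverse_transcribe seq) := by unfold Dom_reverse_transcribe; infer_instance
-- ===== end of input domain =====

-- B performs one pass with the composed character map instead of A's two sequential rewrite passes (simpler).

-- ===== PORT A =====
-- per-character rewrite of A's transcribe loop
def pvTrChar (c : Char) : Char :=
  if c = 'A' then 'U'
  else if c = 'T' then 'A'
  else if c = 'C' then 'G'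
  else 'C'

def transcribePort (seq : String) : String :=
  String.ofList ((seq.toList).map pvTrChar)

-- per-character rewrite of reverse_transcribe's second loop
def pvRevChar (c : Char) : Char :=
  if c = 'A' then 'U'
  else if c = 'U' then 'A'
  else if c = 'C' then 'G'
  else 'C'

def reverse_transcribe (seq : String) : String :=
  String.ofList (((transcribePort seq).toList).map pvRevChar)

-- ===== PORT B =====
def pvCombChar (c : Char) : Char :=
  if c = 'A' then 'A'
  else if c = 'T' then 'U'
  else if c = 'C' then 'C'
  else 'G'

def reverse_transcribe_alt (seq : String) : String :=
  String.ofList ((seq.toList).map pvCombChar)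

-- ===== PRECONDITION & SPEC =====
def Spec_reverse_transcribe (seq : String) (out : String) : Prop := out = reverse_transcribe_alt seq
instance (seq : String) (out : String) : Decidable (Spec_reverse_transcribe seq out) := by unfold Spec_reverse_transcribe; infer_instance

-- ===== CLAIM (what is proved, stated in full; the proofs are below) =====
def Claim_equal_reverse_transcribe : Prop := ∀ (seq : String), Dom_reverse_transcribe seq → Spec_reverse_transcribe seq (reverse_transcribe seq)

-- ===== LEMMAS AND PROOFS =====
theorem pvRev_tr (c : Char) : pvRevChar (pvTrChar c) = pvCombChar c := by
  unfold pvTrChar pvRevChar pvCombChar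
  by_cases hA : c = 'A' <;> by_cases hT : c = 'T' <;> by_cases hC : c = 'C' <;>
    simp [hA, hT, hC]

-- ===== VERDICT (by name: the statement is the Claim_ definition above) =====
theorem reverse_transcribe_spec : Claim_equal_reverse_transcribe := by
  intro seq _
  unfold Spec_reverse_transcribe reverse_transcribe reverse_transcribe_alt transcribePort
  rw [String.toList_ofList, List.map_map]
  congr 1
  exact List.map_congr_left (fun c _ => pvRev_tr c)
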